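-- pv_equiv track=rewrite | github.com/imckechn/leetcode | RandomMediums/815.py | createConnectionsMapTwo
-- ===== SOURCE A (Python) =====
-- def createConnectionsMapTwo(routes):
--     map = {}
--     for route in routes:
--         for i in range(len(route)):
--             if i == len(route)-1:
--                 if route[i] in map:
--                     map[route[i]].append(route[0])
--                 else:
--                     map[route[i]] = [route[0]]
--             else:
--                 if route[i] in map:
--                     map[route[i]].append(route[i+1])
--                 else:
--                     map[route[i]] = [route[i+1]]
--
--     return map
-- ===== SOURCE B (Python) =====
-- def createConnectionsMapTwo(routes):
--     # Stage 1: flatten all circular (stop, successor) pairs of every route.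
--     pairs = [(r[i], r[(i + 1) % len(r)]) for r in routes for i in range(len(r))]
--     # Stage 2: distinct stops in first-occurrence order.
--     keys = list(dict.fromkeys(s for s, _ in pairs))
--     # Stage 3: group-by — for each stop, select all its successors from the flat pair list.
--     return {k: [n for s, n in pairs if s == k] for k in keys}
-- ===== Notes on version B (the rewrite author's own statement) =====
-- stated objective: alternative
-- what changed: Replaces A's incremental dict building (index loop with an i==len-1 wraparound branch and an 'if key in map' branch, appending as it goes) by a staged group-by: flatten all circular (stop, successor) pairs, dedup the stops in first-occurrence order, then build the result by selecting each stop's successors from the flat pair list. (trades an inner filter pass per distinct stop for the branch-free staging)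
import Mathlib
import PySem

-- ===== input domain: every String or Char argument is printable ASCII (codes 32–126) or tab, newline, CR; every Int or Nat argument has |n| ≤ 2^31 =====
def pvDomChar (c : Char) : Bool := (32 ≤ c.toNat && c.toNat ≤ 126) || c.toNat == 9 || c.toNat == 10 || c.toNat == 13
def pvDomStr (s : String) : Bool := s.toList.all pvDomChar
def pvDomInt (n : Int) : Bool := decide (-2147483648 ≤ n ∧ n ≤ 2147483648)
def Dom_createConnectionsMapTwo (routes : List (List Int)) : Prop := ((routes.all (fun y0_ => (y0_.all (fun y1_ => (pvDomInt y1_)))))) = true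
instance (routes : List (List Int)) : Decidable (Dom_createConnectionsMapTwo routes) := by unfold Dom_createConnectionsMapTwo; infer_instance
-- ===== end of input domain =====

-- B replaces A's incremental one-pass dict building (index loop, i==len-1 wraparound branch,
-- 'if key in map' branch) by a staged group-by: flatten all circular (stop, successor) pairs,
-- dedup the stops in first-occurrence order, then select each stop's successors from the flat
-- pair list (objective: alternative — a staged group-by instead of incremental dict
-- mutation; it trades an inner filter pass per distinct stop for the branch-free staging). A mutates nothing observable; equivalence is about the return value.


-- ===== PORT A =====
-- literal transliteration: index loop over range(len(route)), branch on i == len-1,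
-- branch on 'route[i] in map'; indices are always in range so route[i] is pyGetD with default 0
def createConnectionsMapTwo (routes : List (List Int)) : List (Int × List Int) :=
  (routes.foldl (fun m route =>
      (PySem.List.pyRange 0 (route.length : Int) 1).foldl (fun m i =>
        if i = (route.length : Int) - 1 then
          if m.contains (PySem.List.pyGetD route i 0) then
            m.insert (PySem.List.pyGetD route i 0)
              (m.getD (PySem.List.pyGetD route i 0) [] ++ [PySem.List.pyGetD route 0 0])
          else
            m.insert (PySem.List.pyGetD route i 0) [PySem.List.pyGetD route 0 0]
        else
          if m.contains (PySem.List.pyGetD route i 0) then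
            m.insert (PySem.List.pyGetD route i 0)
              (m.getD (PySem.List.pyGetD route i 0) [] ++ [PySem.List.pyGetD route (i + 1) 0])
          else
            m.insert (PySem.List.pyGetD route i 0) [PySem.List.pyGetD route (i + 1) 0]) m)
    PySem.Dict.empty).items

-- ===== PORT B =====
-- Stage 1: pairs = [(r[i], r[(i+1) % len(r)]) for r in routes for i in range(len(r))]
-- (indices in range, so r[i] is pyGetD; % is Python mod = PySem.Int.mod)
def pvPairsB (routes : List (List Int)) : List (Int × Int) :=
  routes.flatMap (fun r =>
    (PySem.List.pyRange 0 (r.length : Int) 1).map (fun i =>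
      (PySem.List.pyGetD r i 0,
       PySem.List.pyGetD r (PySem.Int.mod (i + 1) (r.length : Int)) 0)))

def createConnectionsMapTwo_alt (routes : List (List Int)) : List (Int × List Int) :=
  let pairs := pvPairsB routes
  -- Stage 2: list(dict.fromkeys(s for s, _ in pairs)) is PySem.List.dedup
  let keys := PySem.List.dedup (pairs.map (fun p => p.1))
  -- Stage 3: {k: [n for s, n in pairs if s == k] for k in keys}
  (keys.foldl (fun d k =>
      d.insert k ((pairs.filter (fun p => p.1 == k)).map (·.2))) PySem.Dict.empty).items

-- ===== PRECONDITION & SPEC =====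
def Spec_createConnectionsMapTwo (routes : List (List Int)) (out : List (Int × List Int)) : Prop := out = createConnectionsMapTwo_alt routes
instance (routes : List (List Int)) (out : List (Int × List Int)) : Decidable (Spec_createConnectionsMapTwo routes out) := by unfold Spec_createConnectionsMapTwo; infer_instance

-- ===== CLAIM (what is proved, stated in full; the proofs are below) =====
def Claim_equal_createConnectionsMapTwo : Prop := ∀ (routes : List (List Int)), Dom_createConnectionsMapTwo routes → Spec_createConnectionsMapTwo routes (createConnectionsMapTwo routes)

-- ===== LEMMAS AND PROOFS =====

-- A's in/not-in branching is exactly one 'modify' with default []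
theorem stepA_eq_modify (m : PySem.Dict Int (List Int)) (k x : Int) :
    (if m.contains k then m.insert k (m.getD k [] ++ [x]) else m.insert k [x])
      = m.modify k [] (· ++ [x]) := by
  by_cases h : m.contains k
  · simp [h, PySem.Dict.modify]
  · simp only [Bool.not_eq_true] at h
    simp [h, PySem.Dict.modify, PySem.Dict.getD_of_not_contains m ([] : List Int) h]

-- on indices of range(len r), (i+1) % len r is the wraparound successor index
theorem mod_succ_eq (r : List Int) (i : Int) (hi : i ∈ PySem.List.pyRange 0 (r.length : Int) 1) :
    PySem.Int.mod (i + 1) (r.length : Int) =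
      if i = (r.length : Int) - 1 then 0 else i + 1 := by
  rw [PySem.List.mem_pyRange_one] at hi
  have hpos : (0 : Int) < (r.length : Int) := by omega
  rw [PySem.Int.mod_eq_emod_of_pos hpos]
  by_cases h : i = (r.length : Int) - 1
  · rw [if_pos h, h]
    have h1 : (r.length : Int) - 1 + 1 = (r.length : Int) := by ring
    rw [h1, Int.emod_self]
  · rw [if_neg h, Int.emod_eq_of_lt (by omega) (by omega)]

-- B's per-route pair list, written with A's last-index branch instead of the mod
theorem pairsB_route_eq (r : List Int) :
    (PySem.List.pyRange 0 (r.length : Int) 1).map (fun i =>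
        ((PySem.List.pyGetD r i 0 : Int),
         PySem.List.pyGetD r (PySem.Int.mod (i + 1) (r.length : Int)) 0))
      = (PySem.List.pyRange 0 (r.length : Int) 1).map (fun i =>
        ((PySem.List.pyGetD r i 0 : Int),
         if i = (r.length : Int) - 1 then PySem.List.pyGetD r 0 0
         else PySem.List.pyGetD r (i + 1) 0)) := by
  apply List.map_congr_left
  intro i hi
  rw [mod_succ_eq r i hi]
  by_cases h : i = (r.length : Int) - 1 <;> simp [h]

-- per-route: A's inner index loop is a modify-fold over B's pair list, from any dict
theorem inner_eq (route : List Int) (m : PySem.Dict Int (List Int)) :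
    (PySem.List.pyRange 0 (route.length : Int) 1).foldl (fun m i =>
        if i = (route.length : Int) - 1 then
          if m.contains (PySem.List.pyGetD route i 0) then
            m.insert (PySem.List.pyGetD route i 0)
              (m.getD (PySem.List.pyGetD route i 0) [] ++ [PySem.List.pyGetD route 0 0])
          else
            m.insert (PySem.List.pyGetD route i 0) [PySem.List.pyGetD route 0 0]
        else
          if m.contains (PySem.List.pyGetD route i 0) then
            m.insert (PySem.List.pyGetD route i 0)
              (m.getD (PySem.List.pyGetD route i 0) [] ++ [PySem.List.pyGetD route (i + 1) 0])
          else
            m.insert (PySem.List.pyGetD route i 0) [PySem.List.pyGetD route (i + 1) 0]) m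
      = ((PySem.List.pyRange 0 (route.length : Int) 1).map (fun i =>
            ((PySem.List.pyGetD route i 0 : Int),
             PySem.List.pyGetD route (PySem.Int.mod (i + 1) (route.length : Int)) 0))).foldl
          (fun (m : PySem.Dict Int (List Int)) (p : Int × Int) => m.modify p.1 [] (· ++ [p.2])) m := by
  rw [pairsB_route_eq, List.foldl_map]
  apply PySem.List.foldl_congr_mem
  intro m i _
  by_cases h : i = (route.length : Int) - 1
  · simp only [if_pos h]
    exact stepA_eq_modify _ _ _
  · simp only [if_neg h]
    exact stepA_eq_modify _ _ _

-- A's whole double loop is a single modify-fold over the flattened pair list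
theorem outer_eq (routes : List (List Int)) (m : PySem.Dict Int (List Int)) :
    routes.foldl (fun m route =>
        (PySem.List.pyRange 0 (route.length : Int) 1).foldl (fun m i =>
          if i = (route.length : Int) - 1 then
            if m.contains (PySem.List.pyGetD route i 0) then
              m.insert (PySem.List.pyGetD route i 0)
                (m.getD (PySem.List.pyGetD route i 0) [] ++ [PySem.List.pyGetD route 0 0])
            else
              m.insert (PySem.List.pyGetD route i 0) [PySem.List.pyGetD route 0 0]
          else
            if m.contains (PySem.List.pyGetD route i 0) then
              m.insert (PySem.List.pyGetD route i 0)
                (m.getD (PySem.List.pyGetD route i 0) [] ++ [PySem.List.pyGetD route (i + 1) 0])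
            else
              m.insert (PySem.List.pyGetD route i 0) [PySem.List.pyGetD route (i + 1) 0]) m) m
      = (pvPairsB routes).foldl (fun (m : PySem.Dict Int (List Int)) (p : Int × Int) => m.modify p.1 [] (· ++ [p.2])) m := by
  induction routes generalizing m with
  | nil => rfl
  | cons r rs ih =>
      rw [List.foldl_cons, ih, inner_eq]
      simp [pvPairsB, List.foldl_append]

-- the modify-fold over any pair list, read out as items, is B's group-by
theorem groupby_items (pairs : List (Int × Int)) :
    (pairs.foldl (fun (m : PySem.Dict Int (List Int)) (p : Int × Int) => m.modify p.1 [] (· ++ [p.2])) PySem.Dict.empty).items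
      = ((PySem.List.dedup (pairs.map (fun (p : Int × Int) => p.1))).foldl
          (fun (d : PySem.Dict Int (List Int)) (k : Int) =>
            d.insert k ((pairs.filter (fun (p : Int × Int) => p.1 == k)).map (fun (p : Int × Int) => p.2))) PySem.Dict.empty).items := by
  have hkeys : PySem.List.dedup (pairs.map (fun (p : Int × Int) => p.1))
      = PySem.Set.ofList (pairs.map (·.1)) := PySem.List.dedup_eq_ofList _
  have hnodup : (PySem.Set.ofList (pairs.map (·.1))).Nodup := PySem.Set.nodup_ofList _
  -- left side
  have hDkeys : (pairs.foldl (fun (m : PySem.Dict Int (List Int)) (p : Int × Int) => m.modify p.1 [] (· ++ [p.2]))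
        (PySem.Dict.empty : PySem.Dict Int (List Int))).keys
      = PySem.Set.ofList (pairs.map (·.1)) := by
    rw [PySem.Dict.keys_foldl_modify_key]
    simp [PySem.Dict.keys_empty, PySem.Set.update_nil_left]
  have hlhs : (pairs.foldl (fun (m : PySem.Dict Int (List Int)) (p : Int × Int) => m.modify p.1 [] (· ++ [p.2]))
        (PySem.Dict.empty : PySem.Dict Int (List Int))).items
      = (PySem.Set.ofList (pairs.map (·.1))).map (fun k =>
          (k, (pairs.filter (fun p => p.1 == k)).map (·.2))) := by
    rw [PySem.Dict.items_eq_map_keys _ (by rw [hDkeys]; exact hnodup) ([] : List Int), hDkeys]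
    apply List.map_congr_left
    intro k _
    rw [PySem.Dict.getD_foldl_modify_append]
    simp [PySem.Dict.getD_empty]
  -- right side
  have hrhs : ((PySem.Set.ofList (pairs.map (·.1))).foldl (fun d k =>
        d.insert k ((pairs.filter (fun p => p.1 == k)).map (·.2)))
        (PySem.Dict.empty : PySem.Dict Int (List Int))).items
      = (PySem.Set.ofList (pairs.map (·.1))).map (fun k =>
          (k, (pairs.filter (fun p => p.1 == k)).map (·.2))) := by
    have := PySem.Dict.items_foldl_insert_fresh
      (l := PySem.Set.ofList (pairs.map (·.1)))
      (k := fun k => k)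
      (v := fun k => (pairs.filter (fun p => p.1 == k)).map (·.2))
      (d := (PySem.Dict.empty : PySem.Dict Int (List Int)))
      (by intro a _; exact PySem.Dict.contains_empty a)
      (by simpa using hnodup)
    simpa using this
  rw [hlhs, hkeys, hrhs]

-- ===== VERDICT (by name: the statement is the Claim_ definition above) =====
theorem createConnectionsMapTwo_spec : Claim_equal_createConnectionsMapTwo := by
  intro routes _
  unfold Spec_createConnectionsMapTwo createConnectionsMapTwo createConnectionsMapTwo_alt
  rw [outer_eq]
  exact groupby_items (pvPairsB routes)
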